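-- pv_equiv track=rewrite | github.com/number571/Python | Cryptography/typex.py | stageTwo
-- ===== SOURCE A (Python) =====
-- rotors = (
-- 	(10,24,14,12,23,2,7,15,24,2,7,5,22,6,2,1,22,12,6,9,7,2,11,23,14,2),
-- 	(1,7,11,26,12,5,11,20,11,7,18,6,17,18,19,1,13,5,2,9,11,13,6,17,26,24),
-- 	(9,1,21,6,4,19,25,6,17,10,26,1,23,6,1,17,19,17,25,21,3,21,17,1,18,20)
-- )
--
-- def stageTwo(mode, message, final = ""):
-- 	X,Y,Z = 2,0,1; x,y,z = 1,2,3
-- 	for symbol in message: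
-- 		rotor = rotors[X][x] + rotors[Y][y] + rotors[Z][z]
-- 		if mode == 'E':
-- 			if symbol in [chr(x) for x in range(65,91)]:
-- 				final += chr((ord(symbol) - 13 + rotor)%26 + ord('A'))
-- 			else: continue
-- 		else:
-- 			final += chr((ord(symbol) - 13 - rotor)%26 + ord('A'))
-- 		if x != 25: x += 1
-- 		else:
-- 			x = 0
-- 			if y != 25: y += 1
-- 			else:
-- 				y = 0
-- 				if z != 25: z += 1
-- 				else: z = 0
-- 	return final
-- ===== SOURCE B (Python) =====
-- rotors = (
-- 	(10,24,14,12,23,2,7,15,24,2,7,5,22,6,2,1,22,12,6,9,7,2,11,23,14,2),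
-- 	(1,7,11,26,12,5,11,20,11,7,18,6,17,18,19,1,13,5,2,9,11,13,6,17,26,24),
-- 	(9,1,21,6,4,19,25,6,17,10,26,1,23,6,1,17,19,17,25,21,3,21,17,1,18,20)
-- )
--
-- # one translation table per shift value 0..25, covering the ASCII range
-- _TABLES = [[chr((b - 13 + s) % 26 + 65) for b in range(128)] for s in range(26)]
--
-- def stageTwo(mode, message, final=""):
--     # stage 1: the symbols actually enciphered
--     if mode == 'E':
--         syms = [c for c in message if 'A' <= c <= 'Z']
--         sign = 1
--     else:
--         syms = message
--         sign = -1
--     # stage 2: the key stream, by mixed-radix addition of the position to (1,2,3)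
--     shifts = []
--     for i in range(len(syms)):
--         x, c = (1 + i) % 26, (1 + i) // 26
--         y, c = (2 + c) % 26, (2 + c) // 26
--         z = (3 + c) % 26
--         shifts.append(sign * (rotors[2][x] + rotors[0][y] + rotors[1][z]) % 26)
--     # stage 3: one table lookup per character
--     return final + "".join(_TABLES[s][ord(c)] for c, s in zip(syms, shifts))
-- ===== Notes on version B (the rewrite author's own statement) =====
-- stated objective: alternative
-- what changed: Replaces A's fused per-character loop with stepping odometer and inline modular arithmetic by three staged passes: filter the enciphered symbols, build the key-stream of shifts by mixed-radix addition of the position to (1,2,3), then encipher each symbol by a single lookup in precomputed per-shift translation tables.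
import Mathlib
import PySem

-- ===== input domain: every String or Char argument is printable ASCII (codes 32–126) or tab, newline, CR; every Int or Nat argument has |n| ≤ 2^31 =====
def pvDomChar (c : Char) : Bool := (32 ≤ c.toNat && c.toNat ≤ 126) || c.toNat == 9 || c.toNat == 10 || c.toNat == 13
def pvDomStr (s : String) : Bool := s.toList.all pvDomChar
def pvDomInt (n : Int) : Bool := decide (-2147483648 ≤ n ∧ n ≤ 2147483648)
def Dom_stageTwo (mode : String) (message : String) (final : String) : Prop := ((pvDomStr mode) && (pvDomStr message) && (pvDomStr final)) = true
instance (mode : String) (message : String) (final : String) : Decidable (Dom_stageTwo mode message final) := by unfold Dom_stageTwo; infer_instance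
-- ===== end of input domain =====

-- B restructures A's fused stepping-odometer loop into three staged passes
-- (filter the enciphered symbols, build the key stream, then one precomputed
-- table lookup per character); objective: alternative, same per-character cost.

def rotors0 : List Int := [10,24,14,12,23,2,7,15,24,2,7,5,22,6,2,1,22,12,6,9,7,2,11,23,14,2]
def rotors1 : List Int := [1,7,11,26,12,5,11,20,11,7,18,6,17,18,19,1,13,5,2,9,11,13,6,17,26,24]
def rotors2 : List Int := [9,1,21,6,4,19,25,6,17,10,26,1,23,6,1,17,19,17,25,21,3,21,17,1,18,20]

-- ===== PORT A =====
-- the comprehension [chr(x) for x in range(65,91)]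
def upperList : List Char := (PySem.List.pyRange 65 91 1).map (fun k => Char.ofNat k.toNat)

-- the nested if/else carry chain on (x, y, z) at the end of A's loop body
def stepXYZ (x y z : Nat) : Nat × Nat × Nat :=
  if x ≠ 25 then (x + 1, y, z)
  else if y ≠ 25 then (0, y + 1, z)
  else if z ≠ 25 then (0, 0, z + 1)
  else (0, 0, 0)

def stageTwoLoop (mode : String) (l : List Char) (final : String) (x y z : Nat) : String :=
  match l with
  | [] => final
  | symbol :: rest =>
    let rotor : Int := rotors2.getD x 0 + rotors0.getD y 0 + rotors1.getD z 0
    let app : Option String :=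
      if mode == "E" then
        if upperList.contains symbol then
          some (final.push (Char.ofNat (PySem.Int.mod ((symbol.toNat : Int) - 13 + rotor) 26 + 65).toNat))
        else none  -- continue: no append, no stepping
      else
        some (final.push (Char.ofNat (PySem.Int.mod ((symbol.toNat : Int) - 13 - rotor) 26 + 65).toNat))
    match app with
    | none => stageTwoLoop mode rest final x y z
    | some final' =>
      let st := stepXYZ x y z
      stageTwoLoop mode rest final' st.1 st.2.1 st.2.2

def stageTwo (mode : String) (message : String) (final : String) : String :=
  stageTwoLoop mode message.toList final 1 2 3

-- ===== PORT B =====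
-- _TABLES: one translation table per shift value 0..25, covering the ASCII range
def pvTables : List (List Char) :=
  (List.range 26).map (fun (s : Nat) =>
    (List.range 128).map (fun (b : Nat) => Char.ofNat (PySem.Int.mod ((b : Int) - 13 + (s : Int)) 26 + 65).toNat))

-- stage-2 body: the shift used at absolute position i of the key stream
def keyShift (sign : Int) (i : Nat) : Int :=
  let x := (1 + i) % 26
  let c1 := (1 + i) / 26
  let y := (2 + c1) % 26
  let c2 := (2 + c1) / 26
  let z := (3 + c2) % 26
  PySem.Int.mod (sign * (rotors2.getD x 0 + rotors0.getD y 0 + rotors1.getD z 0)) 26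

def stageTwo_alt (mode : String) (message : String) (final : String) : String :=
  -- stage 1: the symbols actually enciphered
  let syms : List Char :=
    if mode == "E" then message.toList.filter (fun c => 'A' ≤ c && c ≤ 'Z')
    else message.toList
  let sign : Int := if mode == "E" then 1 else -1
  -- stage 2: the key stream
  let shifts : List Int := (List.range syms.length).map (keyShift sign)
  -- stage 3: one table lookup per character
  final ++ String.ofList ((syms.zip shifts).map
    (fun p => (pvTables.getD p.2.toNat []).getD p.1.toNat ' '))

-- ===== PRECONDITION & SPEC =====
def Spec_stageTwo (mode : String) (message : String) (final : String) (out : String) : Prop := out = stageTwo_alt mode message final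
instance (mode : String) (message : String) (final : String) (out : String) : Decidable (Spec_stageTwo mode message final out) := by unfold Spec_stageTwo; infer_instance

-- ===== CLAIM (what is proved, stated in full; the proofs are below) =====
def Claim_equal_stageTwo : Prop := ∀ (mode : String) (message : String) (final : String), Dom_stageTwo mode message final → Spec_stageTwo mode message final (stageTwo mode message final)

-- ===== LEMMAS AND PROOFS =====

-- proof-only middle form: A's loop fused into one pass producing the appended characters
def fused (mode : String) (l : List Char) (c : Nat) : List Char :=
  match l with
  | [] => []
  | s :: rest =>
    if mode == "E" && !('A' ≤ s && s ≤ 'Z') then fused mode rest c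
    else
      let n : Nat := 2081 + c
      let rotor : Int := rotors2.getD (n % 26) 0 + rotors0.getD (n / 26 % 26) 0 + rotors1.getD (n / 676 % 26) 0
      let shift : Int := if mode == "E" then rotor else -rotor
      Char.ofNat (PySem.Int.mod ((s.toNat : Int) - 13 + shift) 26 + 65).toNat :: fused mode rest (c + 1)

-- A's comprehension membership test is exactly 'A' ≤ symbol ≤ 'Z'
lemma upperList_contains (s : Char) :
    upperList.contains s = ('A' ≤ s && s ≤ 'Z') := by
  have h : upperList = ['A','B','C','D','E','F','G','H','I','J','K','L','M','N','O','P','Q','R','S','T','U','V','W','X','Y','Z'] := by decide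
  rw [h]
  by_cases hb : 'A' ≤ s ∧ s ≤ 'Z'
  · have h1 : 65 ≤ s.toNat := hb.1
    have h2 : s.toNat ≤ 90 := hb.2
    have hs : Char.ofNat s.toNat = s := Char.ofNat_toNat s
    simp only [hb.1, hb.2, Bool.and_self, decide_true, List.contains_eq_mem, decide_eq_true_eq]
    simp only [List.mem_cons, List.not_mem_nil, or_false]
    interval_cases h : s.toNat <;> (subst hs; decide)
  · have hb' : ('A' ≤ s && s ≤ 'Z') = false := by
      simpa [Bool.and_eq_true] using hb
    rw [hb', List.contains_eq_mem, decide_eq_false_iff_not]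
    intro hm
    fin_cases hm <;> exact hb (by decide)

-- A's odometer step is the base-26 digit extraction of the successor counter
lemma digits_step (n : Nat) :
    stepXYZ (n % 26) (n / 26 % 26) (n / 676 % 26)
      = ((n + 1) % 26, (n + 1) / 26 % 26, (n + 1) / 676 % 26) := by
  unfold stepXYZ
  split_ifs with h1 h2 h3 <;> refine Prod.ext ?_ (Prod.ext ?_ ?_) <;> simp <;> omega

lemma push_mk (fin : String) (c : Char) (r : List Char) :
    (fin.push c) ++ String.ofList r = fin ++ String.ofList (c :: r) := by
  apply String.toList_injective
  simp

-- A's loop, when (x,y,z) are the base-26 digits of 2081+c, produces final ++ fused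
lemma a_loop (mode : String) (l : List Char) (fin : String) (c : Nat) :
    stageTwoLoop mode l fin ((2081 + c) % 26) ((2081 + c) / 26 % 26) ((2081 + c) / 676 % 26)
      = fin ++ String.ofList (fused mode l c) := by
  induction l generalizing fin c with
  | nil =>
    apply String.toList_injective
    simp [stageTwoLoop, fused]
  | cons s rest ih =>
    simp only [stageTwoLoop, fused, upperList_contains]
    rw [digits_step]
    have hc : 2081 + c + 1 = 2081 + (c + 1) := by omega
    rw [hc]
    by_cases hE : (mode == "E") = true
    · cases hu : ('A' ≤ s && s ≤ 'Z') with
      | false =>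
        rw [if_pos hE]
        simp only [hE, Bool.not_false, Bool.and_true, if_true]
        exact ih fin c
      | true =>
        rw [if_pos hE]
        simp only [hE, reduceIte, Bool.not_true, Bool.and_false, Bool.false_eq_true, if_false]
        rw [ih _ (c + 1), push_mk]
    · have hE' : (mode == "E") = false := by simpa using hE
      rw [if_neg hE]
      simp only [hE', Bool.false_and, Bool.false_eq_true, if_false]
      rw [ih _ (c + 1), push_mk]
      have harg : ((s.toNat : Int) - 13 - (rotors2.getD ((2081+c) % 26) 0 + rotors0.getD ((2081+c) / 26 % 26) 0 + rotors1.getD ((2081+c) / 676 % 26) 0))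
          = (s.toNat : Int) - 13 + -(rotors2.getD ((2081+c) % 26) 0 + rotors0.getD ((2081+c) / 26 % 26) 0 + rotors1.getD ((2081+c) / 676 % 26) 0) := by ring
      rw [harg]

-- keyShift's carry-chain digits agree with the base-26 digits of 2081+i
lemma keyShift_digits (sign : Int) (i : Nat) :
    keyShift sign i
      = PySem.Int.mod (sign * (rotors2.getD ((2081 + i) % 26) 0
          + rotors0.getD ((2081 + i) / 26 % 26) 0
          + rotors1.getD ((2081 + i) / 676 % 26) 0)) 26 := by
  have h1 : (1 + i) % 26 = (2081 + i) % 26 := by omega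
  have h2 : (2 + (1 + i) / 26) % 26 = (2081 + i) / 26 % 26 := by omega
  have h3 : (3 + (2 + (1 + i) / 26) / 26) % 26 = (2081 + i) / 676 % 26 := by omega
  simp only [keyShift]
  rw [h1, h2, h3]

-- absorbing the inner Python %26 of the key stream into the final %26
lemma mod_absorb (a r : Int) :
    PySem.Int.mod (a + PySem.Int.mod r 26) 26 = PySem.Int.mod (a + r) 26 := by
  simp [PySem.Int.mod, Int.fmod_eq_emod]

-- the table lookup computes the shifted character, for shift 0..25 and byte 0..127
lemma table_lookup (s : Nat) (hs : s < 26) (b : Nat) (hb : b < 128) :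
    (pvTables.getD s []).getD b ' '
      = Char.ofNat (PySem.Int.mod ((b : Int) - 13 + s) 26 + 65).toNat := by
  unfold pvTables
  simp [List.getD_eq_getElem?_getD, hs, hb]

lemma pyMod_lt (r : Int) : PySem.Int.mod r 26 < 26 := by
  simp [PySem.Int.mod, Int.fmod_eq_emod]; omega

lemma pyMod_nonneg (r : Int) : 0 ≤ PySem.Int.mod r 26 := by
  simp [PySem.Int.mod, Int.fmod_eq_emod]; omega

-- B's staged zip-map over a symbol list, with the key stream offset by c, is fused
lemma b_stages (mode : String) (sign : Int)
    (hsign : sign = (if mode == "E" then (1 : Int) else -1))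
    (l : List Char) (c : Nat)
    (hdom : ∀ s ∈ l, s.toNat < 128)
    (hfil : (mode == "E") = false) :
    ((l.zip ((List.range l.length).map (fun i => keyShift sign (c + i)))).map
      (fun p => (pvTables.getD p.2.toNat []).getD p.1.toNat ' '))
      = fused mode l c := by
  induction l generalizing c with
  | nil => simp [fused]
  | cons s rest ih =>
    simp only [List.length_cons, List.range_succ_eq_map, List.map_cons, List.map_map,
      List.zip_cons_cons, List.map_cons]
    have hzip : ((List.range rest.length).map ((fun i => keyShift sign (c + i)) ∘ (· + 1)))
        = (List.range rest.length).map (fun i => keyShift sign ((c + 1) + i)) := by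
      apply List.map_congr_left
      intro i _
      simp only [Function.comp]
      congr 1
      omega
    rw [hzip]
    unfold fused
    rw [hfil]
    simp only [Bool.false_and, Bool.false_eq_true, if_false]
    congr 1
    · -- head element
      rw [keyShift_digits]
      set r : Int := rotors2.getD ((2081 + (c + 0)) % 26) 0
          + rotors0.getD ((2081 + (c + 0)) / 26 % 26) 0
          + rotors1.getD ((2081 + (c + 0)) / 676 % 26) 0 with hr
      have hlt := pyMod_lt (sign * r)
      have hge := pyMod_nonneg (sign * r)
      have hsNat : (PySem.Int.mod (sign * r) 26).toNat < 26 := by omega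
      have hcast : ((PySem.Int.mod (sign * r) 26).toNat : Int) = PySem.Int.mod (sign * r) 26 := by
        omega
      rw [table_lookup _ hsNat _ (hdom s (List.mem_cons_self)), hcast, mod_absorb]
      have hc0 : c + 0 = c := by omega
      rw [hc0] at hr
      rw [hsign, hfil]
      simp only [Bool.false_eq_true, if_false]
      congr 2
      rw [hr]; ring_nf
    · exact ih (c + 1) (fun x hx => hdom x (List.mem_cons_of_mem _ hx))

-- same statement for mode == "E" (filtered symbols)
lemma b_stages_E (mode : String) (sign : Int)
    (hsign : sign = (if mode == "E" then (1 : Int) else -1))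
    (l : List Char) (c : Nat)
    (hdom : ∀ s ∈ l, s.toNat < 128)
    (hfil : (mode == "E") = true) :
    (((l.filter (fun ch => 'A' ≤ ch && ch ≤ 'Z')).zip
        ((List.range (l.filter (fun ch => 'A' ≤ ch && ch ≤ 'Z')).length).map
          (fun i => keyShift sign (c + i)))).map
      (fun p => (pvTables.getD p.2.toNat []).getD p.1.toNat ' '))
      = fused mode l c := by
  induction l generalizing c with
  | nil => simp [fused]
  | cons s rest ih =>
    unfold fused
    rw [hfil]
    simp only [Bool.true_and]
    by_cases hu : ('A' ≤ s && s ≤ 'Z') = true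
    · rw [List.filter_cons, if_pos hu]
      simp only [List.length_cons, List.range_succ_eq_map, List.map_cons, List.map_map,
        List.zip_cons_cons, List.map_cons]
      have hzip : ((List.range (rest.filter (fun ch => 'A' ≤ ch && ch ≤ 'Z')).length).map
            ((fun i => keyShift sign (c + i)) ∘ (· + 1)))
          = (List.range (rest.filter (fun ch => 'A' ≤ ch && ch ≤ 'Z')).length).map
            (fun i => keyShift sign ((c + 1) + i)) := by
        apply List.map_congr_left
        intro i _
        simp only [Function.comp]
        congr 1
        omega
      rw [hzip]
      rw [hu]
      simp only [Bool.not_true, Bool.false_eq_true, if_false]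
      congr 1
      · rw [keyShift_digits]
        set r : Int := rotors2.getD ((2081 + (c + 0)) % 26) 0
            + rotors0.getD ((2081 + (c + 0)) / 26 % 26) 0
            + rotors1.getD ((2081 + (c + 0)) / 676 % 26) 0 with hr
        have hlt := pyMod_lt (sign * r)
        have hge := pyMod_nonneg (sign * r)
        have hsNat : (PySem.Int.mod (sign * r) 26).toNat < 26 := by omega
        have hcast : ((PySem.Int.mod (sign * r) 26).toNat : Int) = PySem.Int.mod (sign * r) 26 := by
          omega
        rw [table_lookup _ hsNat _ (hdom s (List.mem_cons_self)), hcast, mod_absorb]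
        have hc0 : c + 0 = c := by omega
        rw [hc0] at hr
        rw [hsign, hfil]
        simp only [if_true]
        congr 2
        rw [hr]; ring_nf
      · exact ih (c + 1) (fun x hx => hdom x (List.mem_cons_of_mem _ hx))
    · rw [List.filter_cons, if_neg hu, Bool.eq_false_iff.mpr hu]
      simp only [Bool.not_false, if_true]
      exact ih c (fun x hx => hdom x (List.mem_cons_of_mem _ hx))

-- ===== VERDICT (by name: the statement is the Claim_ definition above) =====
theorem stageTwo_spec : Claim_equal_stageTwo := by
  intro mode message final hdom
  unfold Spec_stageTwo stageTwo stageTwo_alt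
  have hchars : ∀ s ∈ message.toList, s.toNat < 128 := by
    intro s hs
    have : pvDomStr message = true := by
      unfold Dom_stageTwo at hdom
      simp [Bool.and_eq_true] at hdom
      exact hdom.1.2
    unfold pvDomStr at this
    have := (List.all_eq_true.mp this) s hs
    unfold pvDomChar at this
    simp [Bool.or_eq_true, Bool.and_eq_true] at this
    omega
  have hA := a_loop mode message.toList final 0
  simp only [Nat.add_zero] at hA
  have hA' : stageTwoLoop mode message.toList final 1 2 3
      = final ++ String.ofList (fused mode message.toList 0) := by
    have e1 : (2081 : Nat) % 26 = 1 := by norm_num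
    have e2 : (2081 : Nat) / 26 % 26 = 2 := by norm_num
    have e3 : (2081 : Nat) / 676 % 26 = 3 := by norm_num
    rw [← e1, ← e2, ← e3]
    exact hA
  rw [hA']
  by_cases hE : (mode == "E") = true
  · rw [← b_stages_E mode _ rfl message.toList 0 hchars hE]
    simp [hE]
  · have hE' : (mode == "E") = false := by simpa using hE
    rw [← b_stages mode _ rfl message.toList 0 hchars hE']
    simp [hE']
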